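-- pv_equiv track=rewrite | github.com/Hall-No-7/ps-study | dalcom/kakao-friends-4block/kakao-friends-4block.py | solution
-- ===== SOURCE A (Python) =====
-- yx = [(0, 0), (0, 1), (1, 0), (1, 1)]
--
-- def check(visited, board, p, m, n):
--     for y, x in yx:
--         yy = p[0] + y
--         xx = p[1] + x
--         if yy < 0 or yy >= m or xx < 0 or xx >= n:
--             return 0
--         if board[yy][xx] == board[p[0]][p[1]]:
--             continue
--         else:
--             return 0
--
--     result = 0
--     for y, x in yx:
--         yy = p[0] + y
--         xx = p[1] + x
--         if not visited[yy][xx]: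
--             result += 1
--         visited[yy][xx] = True
--     return result
--
-- def erase(board, visited, m, n):
--     for c in range(n):
--         info = []
--         cnt = 0
--         for r in range(m):
--             if visited[r][c]:
--                 board[r][c] = " "
--                 visited[r][c] = False
--
--         for r in range(m - 1, -1, -1):
--             if board[r][c] == " ":
--                 cnt += 1
--             elif cnt > 0:
--                 info.append((r, cnt))
--
--         for y, diff in info:
--             board[y + diff][c] = board[y][c]
--             board[y][c] = " "
--
-- def solution(m, n, board):
--     answer = 0
--     board = [list(board[i]) for i in range(len(board))]
--     visited = [[False for _ in range(n)] for _ in range(m)]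
--     done = False
--
--     while done == False:
--         done = True
--         for i, row in enumerate(board):
--             for j, val in enumerate(row):
--                 if val == " ":
--                     continue
--                 res = check(visited, board, (i, j), m, n)
--                 if res != 0:
--                     done = False
--                 answer += res
--
--         if done == False:
--             erase(board, visited, m, n)
--
--     return answer
-- ===== SOURCE B (Python) =====
-- def solution(m, n, board):
--     # Columns-as-lists representation with a per-cell local erasure test and a pure
--     # rebuild of each column every round (no visited bookkeeping, no cell shifting).
--     if m < 2 or n < 2:
--         return 0   # no 2x2 block ever fits
--     cols = [[board[i][j] for i in range(m)] for j in range(n)]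
--
--     def erased(cols, j, i):
--         # cell (row i, column j) belongs to some monochrome non-blank 2x2 block
--         v = cols[j][i]
--         if v == ' ':
--             return False
--         for di in (0, 1):
--             for dj in (0, 1):
--                 i0 = i - di
--                 j0 = j - dj
--                 if 0 <= i0 and i0 + 1 < m and 0 <= j0 and j0 + 1 < n \
--                         and cols[j0][i0] == v and cols[j0][i0 + 1] == v \
--                         and cols[j0 + 1][i0] == v and cols[j0 + 1][i0 + 1] == v:
--                     return True
--         return False
--
--     total = 0
--     while True:
--         cnt = sum(sum(1 for i in range(m) if erased(cols, j, i)) for j in range(n))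
--         if cnt == 0:
--             return total
--         total += cnt
--         cols = [[' '] * (m - len(kept)) + kept
--                 for kept in ([cols[j][i] for i in range(m)
--                               if cols[j][i] != ' ' and not erased(cols, j, i)]
--                              for j in range(n))]
-- ===== Notes on version B (the rewrite author's own statement) =====
-- stated objective: alternative
-- what changed: B stores the board as a list of columns and each round decides erasure per cell by a local four-corner 2x2 test, then rebuilds every column purely (filter the kept tiles, left-pad blanks), replacing A's row-grid with visited-matrix marking, per-block newly-visited counting and three-pass count-and-shift gravity.
-- outside the precondition, e.g. on solution(2, 2, []): A returns 0, B raises IndexError; on solution(2, 2, ['AB']): A returns 0, B raises IndexError; on solution(2, 2, ['AAB', 'AAB']): A returns 4, B returns 4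
import Mathlib
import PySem

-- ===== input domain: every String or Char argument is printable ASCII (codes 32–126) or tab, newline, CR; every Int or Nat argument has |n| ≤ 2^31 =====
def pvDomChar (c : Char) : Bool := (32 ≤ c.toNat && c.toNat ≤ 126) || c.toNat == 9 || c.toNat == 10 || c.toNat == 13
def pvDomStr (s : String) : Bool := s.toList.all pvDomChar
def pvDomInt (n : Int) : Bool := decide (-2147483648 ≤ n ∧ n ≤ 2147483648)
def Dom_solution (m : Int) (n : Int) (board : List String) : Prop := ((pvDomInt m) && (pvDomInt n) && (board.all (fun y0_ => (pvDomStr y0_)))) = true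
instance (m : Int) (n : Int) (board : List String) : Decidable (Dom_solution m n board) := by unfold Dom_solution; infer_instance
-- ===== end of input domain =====

-- B stores the board as a list of columns, decides erasure per cell by a local
-- four-corner 2x2 test and rebuilds each column purely by filtering kept tiles and
-- left-padding blanks, replacing A's visited-matrix marking and three-pass
-- count-and-shift gravity (objective: alternative).

-- ===== PORT A =====
-- shared 2D plumbing: grid[r][c] reads and writes (in-range on the stated Pre_)
def get2 {α : Type} (b : List (List α)) (r c : Nat) (d : α) : α := (b.getD r []).getD c d
def set2 {α : Type} (b : List (List α)) (r c : Nat) (x : α) : List (List α) :=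
  b.set r ((b.getD r []).set c x)

def yxA : List (Nat × Nat) := [(0, 0), (0, 1), (1, 0), (1, 1)]

-- first loop of Python's check: bounds and colour tests (yy < 0 is impossible for Nat indices)
def checkOkA (b : List (List Char)) (m n i j : Nat) : Bool :=
  yxA.all (fun p =>
    decide (i + p.1 < m) && decide (j + p.2 < n) &&
    (get2 b (i + p.1) (j + p.2) ' ' == get2 b i j ' '))

-- second loop of Python's check: count newly visited cells and mark them
def markA (v : List (List Bool)) (i j : Nat) : List (List Bool) × Int :=
  yxA.foldl (fun (st : List (List Bool) × Int) p =>
    (set2 st.1 (i + p.1) (j + p.2) true,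
     st.2 + (if get2 st.1 (i + p.1) (j + p.2) false then 0 else 1))) (v, 0)

def checkA (v : List (List Bool)) (b : List (List Char)) (i j m n : Nat) :
    List (List Bool) × Int :=
  if checkOkA b m n i j then markA v i j else (v, 0)

-- the scan of the while-body: for i,row in enumerate(board): for j,val in enumerate(row): …
def scanA (b : List (List Char)) (v : List (List Bool)) (m n : Nat) (ans : Int) :
    List (List Bool) × Int × Bool :=
  (List.range b.length).foldl (fun st i =>
    (List.range (b.getD i []).length).foldl
      (fun (st : List (List Bool) × Int × Bool) j =>
        if get2 b i j ' ' == ' ' then st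
        else
          let r := checkA st.1 b i j m n
          (r.1, st.2.1 + r.2, st.2.2 && (r.2 == 0))) st) (v, ans, true)

-- erase, first r-loop: blank visited cells, clear visited
def erasePass1A (b : List (List Char)) (v : List (List Bool)) (c m : Nat) :
    List (List Char) × List (List Bool) :=
  (List.range m).foldl (fun (st : List (List Char) × List (List Bool)) r =>
    if get2 st.2 r c false then (set2 st.1 r c ' ', set2 st.2 r c false) else st) (b, v)

-- erase, second r-loop (range(m-1,-1,-1)): collect (row, blank-count) pairs
def erasePass2A (b : List (List Char)) (c m : Nat) : List (Nat × Nat) :=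
  ((List.range m).reverse.foldl (fun (st : List (Nat × Nat) × Nat) r =>
    if get2 b r c ' ' == ' ' then (st.1, st.2 + 1)
    else if st.2 > 0 then (st.1 ++ [(r, st.2)], st.2) else st) ([], 0)).1

-- erase, third loop: shift each recorded cell down by its blank count
def erasePass3A (b : List (List Char)) (c : Nat) (info : List (Nat × Nat)) :
    List (List Char) :=
  info.foldl (fun b p => set2 (set2 b (p.1 + p.2) c (get2 b p.1 c ' ')) p.1 c ' ') b

def eraseA (b : List (List Char)) (v : List (List Bool)) (m n : Nat) :
    List (List Char) × List (List Bool) :=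
  (List.range n).foldl (fun st c =>
    let st1 := erasePass1A st.1 st.2 c m
    (erasePass3A st1.1 c (erasePass2A st1.1 c m), st1.2)) (b, v)

-- the while-loop; the fuel only makes the recursion total: each erasing round blanks
-- at least one cell of the m×n window, so m*n+1 rounds always reach the stable state
def loopA (fuel : Nat) (b : List (List Char)) (v : List (List Bool)) (m n : Nat)
    (ans : Int) : Int :=
  match fuel with
  | 0 => ans
  | fuel + 1 =>
    let s := scanA b v m n ans
    if s.2.2 then s.2.1
    else
      let e := eraseA b s.1 m n
      loopA fuel e.1 e.2 m n s.2.1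

def solution (m : Int) (n : Int) (board : List String) : Int :=
  loopA (m.toNat * n.toNat + 1) (board.map (·.toList))
    (List.replicate m.toNat (List.replicate n.toNat false)) m.toNat n.toNat 0

-- ===== PORT B =====
-- cols = [[board[i][j] for i in range(m)] for j in range(n)]
def colsInitB (board : List String) (m n : Nat) : List (List Char) :=
  (List.range n).map (fun j => (List.range m).map (fun i => ((board.getD i "").toList).getD j ' '))

-- erased(cols, j, i): the cell belongs to some monochrome non-blank 2x2 block,
-- tested locally over the four candidate top-left corners (di, dj)
def erasedB (cols : List (List Char)) (m n j i : Nat) : Bool :=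
  let v := get2 cols j i ' '
  !(v == ' ') && (([(0, 0), (0, 1), (1, 0), (1, 1)] : List (Nat × Nat)).any (fun d =>
    decide (d.1 ≤ i) && decide (d.2 ≤ j) &&
    decide (i - d.1 + 1 < m) && decide (j - d.2 + 1 < n) &&
    (get2 cols (j - d.2) (i - d.1) ' ' == v) && (get2 cols (j - d.2) (i - d.1 + 1) ' ' == v) &&
    (get2 cols (j - d.2 + 1) (i - d.1) ' ' == v) && (get2 cols (j - d.2 + 1) (i - d.1 + 1) ' ' == v)))

-- cnt = sum(sum(1 for i in range(m) if erased(cols, j, i)) for j in range(n))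
-- (Python's sum of a generator is a left fold)
def cntB (cols : List (List Char)) (m n : Nat) : Nat :=
  (List.range n).foldl
    (fun acc j => acc + ((List.range m).filter (fun i => erasedB cols m n j i)).length) 0

-- one rebuilt column: kept tiles (non-blank, not erased) left-padded with blanks
def restackB (cols : List (List Char)) (m n j : Nat) : List Char :=
  let kept := ((List.range m).filter (fun i =>
    !(get2 cols j i ' ' == ' ') && !erasedB cols m n j i)).map (fun i => get2 cols j i ' ')
  List.replicate (m - kept.length) ' ' ++ kept

def stepB (cols : List (List Char)) (m n : Nat) : List (List Char) :=
  (List.range n).map (fun j => restackB cols m n j)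

def loopB (fuel : Nat) (cols : List (List Char)) (m n : Nat) (total : Int) : Int :=
  match fuel with
  | 0 => total
  | fuel + 1 =>
    let cnt := cntB cols m n
    if cnt = 0 then total
    else loopB fuel (stepB cols m n) m n (total + cnt)

def solution_alt (m : Int) (n : Int) (board : List String) : Int :=
  if m < 2 ∨ n < 2 then 0   -- no 2x2 block ever fits
  else loopB (m.toNat * n.toNat + 1) (colsInitB board m.toNat n.toNat) m.toNat n.toNat 0

-- ===== PRECONDITION & SPEC =====
-- Pre_ admits degenerate dimensions (m ≤ 0 or n ≤ 0: both programs return 0 without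
-- reading the board) and exact m×n boards; it excludes positive-dimension boards whose
-- shape differs from m×n — there A raises IndexError on a missing window cell or
-- returns the count of the window it happens to reach, a shape the puzzle never supplies.
def Pre_solution (m : Int) (n : Int) (board : List String) : Prop :=
  m ≤ 0 ∨ n ≤ 0 ∨ ((board.length : Int) = m ∧ ∀ s ∈ board, (s.toList.length : Int) = n)

instance (m : Int) (n : Int) (board : List String) : Decidable (Pre_solution m n board) := by
  unfold Pre_solution; infer_instance

def pvWitness_solution : Int × Int × List String := (2, 3, ["AAB", "AAB"])

def Spec_solution (m : Int) (n : Int) (board : List String) (out : Int) : Prop :=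
  out = solution_alt m n board
instance (m : Int) (n : Int) (board : List String) (out : Int) :
    Decidable (Spec_solution m n board out) := by unfold Spec_solution; infer_instance

-- ===== CLAIM (what is proved, stated in full; the proofs are below) =====
def Claim_equal_solution : Prop := ∀ (m : Int) (n : Int) (board : List String),
  Dom_solution m n board → Pre_solution m n board →
  Spec_solution m n board (solution m n board)


-- ===== LEMMAS AND PROOFS =====

-- proof-layer notions: grid shape, the all-false visited grid, columns, and the
-- stacked (gravity-applied) form of a column
def Shape {α : Type} (M N : Nat) (b : List (List α)) : Prop :=
  b.length = M ∧ ∀ row ∈ b, row.length = N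

def falseGrid (M N : Nat) : List (List Bool) :=
  List.replicate M (List.replicate N false)

def getCol (b : List (List Char)) (c : Nat) : List Char :=
  b.map (fun row => row.getD c ' ')

def keptOf (col : List Char) : List Char := col.filter (fun x => !(x == ' '))

def stack (col : List Char) : List Char :=
  List.replicate (col.length - (keptOf col).length) ' ' ++ keptOf col

def sstep (col : List Char) (st : List (Nat × Nat) × Nat) (r : Nat) :
    List (Nat × Nat) × Nat :=
  if col.getD r ' ' == ' ' then (st.1, st.2 + 1)
  else if st.2 > 0 then (st.1 ++ [(r, st.2)], st.2) else st

def movesCol (info : List (Nat × Nat)) (col : List Char) : List Char :=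
  info.foldl (fun col p => (col.set (p.1 + p.2) (col.getD p.1 ' ')).set p.1 ' ') col

def Ind (v : List (List Bool)) (s : List (Nat × Nat)) : Prop :=
  ∀ r c, get2 v r c false = decide ((r, c) ∈ s)

def Window (M N : Nat) (s : List (Nat × Nat)) : Prop := ∀ p ∈ s, p.1 < M ∧ p.2 < N

-- A-scan proof device: the set of erased cells, built the way A's scan visits corners
def blockB (b : List (List Char)) (i j : Nat) : Bool :=
  let v := get2 b i j ' '
  !(v == ' ') && (v == get2 b i (j + 1) ' ') && (v == get2 b (i + 1) j ' ') &&
    (v == get2 b (i + 1) (j + 1) ' ')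

def Scell (b : List (List Char)) (i : Nat) (s : PySem.Set (Nat × Nat)) (j : Nat) :
    PySem.Set (Nat × Nat) :=
  if blockB b i j then
    PySem.Set.update s [(i, j), (i, j + 1), (i + 1, j), (i + 1, j + 1)]
  else s

def collectS (b : List (List Char)) (m n : Nat) : PySem.Set (Nat × Nat) :=
  (List.range (m - 1)).foldl (fun s i =>
    (List.range (n - 1)).foldl (Scell b i) s) PySem.Set.empty

-- columns-of-a-row-grid projection: what B's state must equal
def colsOf (g : List (List Char)) (M N : Nat) : List (List Char) :=
  (List.range N).map (fun j => (List.range M).map (fun i => get2 g i j ' '))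

-- the covered-cell predicate (cell (r,c) lies in a monochrome non-blank block)
def CoveredP (g : List (List Char)) (M N r c : Nat) : Prop :=
  ∃ i j, i + 1 < M ∧ j + 1 < N ∧ blockB g i j = true ∧
    ∃ d ∈ yxA, (r, c) = (i + d.1, j + d.2)

-- generic fold lemmas
theorem foldl_rel {α β γ : Type} (R : α → β → Prop) (l : List γ) (f : α → γ → α)
    (g : β → γ → β) (h : ∀ a b x, x ∈ l → R a b → R (f a x) (g b x)) :
    ∀ {a : α} {b : β}, R a b → R (l.foldl f a) (l.foldl g b) := by
  induction l with
  | nil => intro a b hab; exact hab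
  | cons x xs ih =>
    intro a b hab
    exact ih (fun a b y hy => h a b y (List.mem_cons_of_mem _ hy))
      (h a b x (List.mem_cons_self) hab)

theorem foldl_id {α γ : Type} (l : List γ) (f : α → γ → α)
    (h : ∀ a x, x ∈ l → f a x = a) (a : α) : l.foldl f a = a := by
  induction l generalizing a with
  | nil => rfl
  | cons x xs ih =>
    rw [List.foldl_cons, h a x (List.mem_cons_self)]
    exact ih (fun a y hy => h a y (List.mem_cons_of_mem _ hy)) a

theorem foldl_pres {α γ : Type} (P : α → Prop) (l : List γ) (f : α → γ → α)
    (h : ∀ a x, x ∈ l → P a → P (f a x)) : ∀ {a : α}, P a → P (l.foldl f a) := by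
  induction l with
  | nil => intro a ha; exact ha
  | cons x xs ih =>
    intro a ha
    exact ih (fun a y hy => h a y (List.mem_cons_of_mem _ hy))
      (h a x (List.mem_cons_self) ha)

theorem mem_foldl_gen {σ γ : Type} (mem : σ → Prop) (l : List γ) (f : σ → γ → σ)
    (P : γ → Prop) (hf : ∀ s x, x ∈ l → (mem (f s x) ↔ mem s ∨ P x)) :
    ∀ s, mem (l.foldl f s) ↔ mem s ∨ ∃ x ∈ l, P x := by
  induction l with
  | nil => intro s; simp
  | cons x xs ih =>
    intro s
    rw [List.foldl_cons,
      ih (fun s y hy => hf s y (List.mem_cons_of_mem _ hy)) (f s x),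
      hf s x List.mem_cons_self]
    constructor
    · rintro ((h | h) | ⟨y, hy, h⟩)
      · exact Or.inl h
      · exact Or.inr ⟨x, List.mem_cons_self, h⟩
      · exact Or.inr ⟨y, List.mem_cons_of_mem _ hy, h⟩
    · rintro (h | ⟨y, hy, h⟩)
      · exact Or.inl (Or.inl h)
      · rcases List.mem_cons.mp hy with rfl | hy
        · exact Or.inl (Or.inr h)
        · exact Or.inr ⟨y, hy, h⟩

-- 2D plumbing
theorem getD_set_self' {α : Type} (l : List α) (i : Nat) (a d : α) (h : i < l.length) :
    (l.set i a).getD i d = a := by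
  simp [List.getD_eq_getElem?_getD, h]

theorem getD_set_ne' {α : Type} (l : List α) {i j : Nat} (h : i ≠ j) (a d : α) :
    (l.set i a).getD j d = l.getD j d := by
  simp [List.getD_eq_getElem?_getD, List.getElem?_set_ne h]

theorem get2_set2 {α : Type} {M N : Nat} {b : List (List α)} (hs : Shape M N b)
    {r c : Nat} (hr : r < M) (hc : c < N) (x : α) (r' c' : Nat) (d : α) :
    get2 (set2 b r c x) r' c' d = if r' = r ∧ c' = c then x else get2 b r' c' d := by
  obtain ⟨hlen, hrow⟩ := hs
  have hrb : r < b.length := by omega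
  have hrowlen : (b.getD r []).length = N := by
    rw [List.getD_eq_getElem b [] hrb]; exact hrow _ (List.getElem_mem hrb)
  unfold get2 set2
  by_cases hr' : r' = r
  · subst hr'
    rw [getD_set_self' _ _ _ _ hrb]
    by_cases hc' : c' = c
    · subst hc'
      rw [getD_set_self' _ _ _ _ (by omega)]
      simp
    · rw [getD_set_ne' _ (fun h => hc' h.symm)]
      simp [hc']
  · rw [getD_set_ne' _ (fun h => hr' h.symm)]
    simp [hr']

theorem shape_set2 {α : Type} {M N : Nat} {b : List (List α)} (hs : Shape M N b)
    (r c : Nat) (x : α) : Shape M N (set2 b r c x) := by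
  obtain ⟨hlen, hrow⟩ := hs
  refine ⟨by simp [set2, hlen], ?_⟩
  rcases Nat.lt_or_ge r b.length with h1 | h1
  · intro row hmem
    unfold set2 at hmem
    rcases List.mem_or_eq_of_mem_set hmem with h | h
    · exact hrow _ h
    · subst h
      rw [List.length_set, List.getD_eq_getElem b [] h1]
      exact hrow _ (List.getElem_mem h1)
  · unfold set2
    rw [List.set_eq_of_length_le (by omega)]
    exact hrow

theorem length_getCol (b : List (List Char)) (c : Nat) : (getCol b c).length = b.length := by
  simp [getCol]

theorem getD_getCol (b : List (List Char)) (c r : Nat) :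
    (getCol b c).getD r ' ' = get2 b r c ' ' := by
  unfold getCol get2
  simp only [List.getD_eq_getElem?_getD, List.getElem?_map]
  cases b[r]? <;> simp

theorem getCol_set2_same {M N : Nat} {b : List (List Char)} (hs : Shape M N b)
    {c : Nat} (hc : c < N) (r : Nat) (x : Char) :
    getCol (set2 b r c x) c = (getCol b c).set r x := by
  rcases Nat.lt_or_ge r b.length with h1 | h1
  · have hrowlen : (b.getD r []).length = N := by
      rw [List.getD_eq_getElem b [] h1]; exact hs.2 _ (List.getElem_mem h1)
    unfold getCol set2
    rw [List.map_set]
    congr 1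
    rw [getD_set_self' _ _ _ _ (by omega)]
  · unfold getCol set2
    rw [List.set_eq_of_length_le h1, List.set_eq_of_length_le (by simpa [getCol] using h1)]

theorem getCol_set2_ne {b : List (List Char)} {c c' : Nat} (hne : c' ≠ c) (r : Nat)
    (x : Char) : getCol (set2 b r c x) c' = getCol b c' := by
  apply List.ext_getElem?
  intro k
  unfold getCol set2
  simp only [List.getElem?_map, List.getElem?_set]
  by_cases hk : r = k
  · subst hk
    by_cases h1 : r < b.length
    · simp [h1, List.getElem?_eq_getElem h1, List.getElem?_set_ne (fun h => hne h.symm)]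
    · simp [h1]
  · simp [hk]

theorem eq_falseGrid {M N : Nat} {v : List (List Bool)} (hv : Shape M N v)
    (h : ∀ r c, r < M → c < N → get2 v r c false = false) : v = falseGrid M N := by
  obtain ⟨hv1, hv2⟩ := hv
  unfold falseGrid
  apply List.ext_getElem (by simp [hv1])
  intro r hr hr'
  have hN : v[r].length = N := hv2 _ (List.getElem_mem hr)
  apply List.ext_getElem (by simp [hN])
  intro c hcv hcv'
  have := h r c (by omega) (by simpa using hcv')
  unfold get2 at this
  rw [List.getD_eq_getElem v [] hr, List.getD_eq_getElem _ false (by omega)] at this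
  simp [this]

theorem shape_falseGrid (M N : Nat) : Shape M N (falseGrid M N) := by
  constructor
  · simp [falseGrid]
  · intro row hrow
    rw [List.eq_of_mem_replicate hrow]
    simp

theorem get2_falseGrid (M N r c : Nat) : get2 (falseGrid M N) r c false = false := by
  unfold get2 falseGrid
  simp only [List.getD_eq_getElem?_getD, List.getElem?_replicate]
  by_cases h : r < M <;> by_cases h2 : c < N <;> simp [h, h2]

theorem get2_beyond_shape {α : Type} {M N : Nat} {v : List (List α)} (hv : Shape M N v)
    {r c : Nat} (h : M ≤ r ∨ N ≤ c) (d : α) : get2 v r c d = d := by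
  have hvl : v.length = M := hv.1
  unfold get2
  rcases h with h | h
  · rw [List.getD_eq_default _ _ (by omega : v.length ≤ r)]
    simp
  · rcases Nat.lt_or_ge r v.length with h1 | h1
    · have : (v.getD r []).length = N := by
        rw [List.getD_eq_getElem v [] h1]; exact hv.2 _ (List.getElem_mem h1)
      rw [List.getD_eq_default _ _ (by omega)]
    · rw [List.getD_eq_default _ _ h1]; simp

-- ===== the scan phase =====
def AcellA (b : List (List Char)) (M N i : Nat) (st : List (List Bool) × Int × Bool)
    (j : Nat) : List (List Bool) × Int × Bool :=
  if get2 b i j ' ' == ' ' then st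
  else
    let r := checkA st.1 b i j M N
    (r.1, st.2.1 + r.2, st.2.2 && (r.2 == 0))

theorem scanA_eq_fold (b : List (List Char)) (v : List (List Bool)) (M N : Nat)
    (ans : Int) :
    scanA b v M N ans = (List.range b.length).foldl (fun st i =>
      (List.range (b.getD i []).length).foldl (AcellA b M N i) st) (v, ans, true) := rfl

def InvS (M N : Nat) (ans : Int) (st : List (List Bool) × Int × Bool)
    (s : List (Nat × Nat)) : Prop :=
  Ind st.1 s ∧ Shape M N st.1 ∧ st.2.1 = ans + s.length ∧ st.2.2 = s.isEmpty ∧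
    Window M N s

theorem char_beq_comm (a b : Char) : (a == b) = (b == a) := by
  by_cases h : a = b
  · simp [h]
  · have h' : ¬ b = a := fun hh => h hh.symm
    simp [h, h']

theorem cell_boundary {M N : Nat} (b : List (List Char)) {i j : Nat}
    (h : ¬(i + 1 < M ∧ j + 1 < N)) (st : List (List Bool) × Int × Bool) :
    AcellA b M N i st j = st := by
  unfold AcellA
  by_cases hval : (get2 b i j ' ' == ' ') = true
  · simp [hval]
  · have hok : checkOkA b M N i j = false := by
      unfold checkOkA yxA
      simp only [List.all_cons, List.all_nil, Bool.and_true]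
      rcases not_and_or.mp h with h1 | h1
      · have : decide (i + 1 < M) = false := by simpa using h1
        simp [this]
      · have : decide (j + 1 < N) = false := by simpa using h1
        simp [this]
    rw [if_neg hval]
    unfold checkA
    rw [hok]
    simp

theorem checkOk_iff {M N : Nat} (b : List (List Char)) {i j : Nat} (hi : i + 1 < M)
    (hj : j + 1 < N) (hval : (get2 b i j ' ' == ' ') = false) :
    checkOkA b M N i j = blockB b i j := by
  unfold checkOkA blockB yxA
  simp only [List.all_cons, List.all_nil, Bool.and_true]
  have h00 : decide (i + 0 < M) = true := by simp; omega
  have h01 : decide (j + 0 < N) = true := by simp; omega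
  have h10 : decide (i + 1 < M) = true := by simpa using hi
  have h11 : decide (j + 1 < N) = true := by simpa using hj
  simp only [Nat.add_zero] at *
  rw [char_beq_comm (get2 b i (j+1) ' '), char_beq_comm (get2 b (i+1) j ' '),
    char_beq_comm (get2 b (i+1) (j+1) ' ')]
  simp [h00, h01, h10, h11, hval, Bool.and_assoc]

theorem mark_one {M N : Nat} {v : List (List Bool)} {s : List (Nat × Nat)}
    (hv : Shape M N v) (hInd : Ind v s) (hw : Window M N s) {r c : Nat} (hr : r < M)
    (hc : c < N) :
    Ind (set2 v r c true) (PySem.Set.add s (r, c)) ∧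
    Shape M N (set2 v r c true) ∧ Window M N (PySem.Set.add s (r, c)) ∧
    ((PySem.Set.add s (r, c)).length : Int) =
      s.length + (if get2 v r c false then 0 else 1) := by
  refine ⟨?_, shape_set2 hv r c true, ?_, ?_⟩
  · intro r' c'
    rw [get2_set2 hv hr hc true r' c' false]
    by_cases h : r' = r ∧ c' = c
    · obtain ⟨h1, h2⟩ := h
      subst h1; subst h2
      simp [PySem.Set.mem_add]
    · rw [if_neg h, hInd r' c']
      have : ((r', c') ∈ PySem.Set.add s (r, c)) ↔ (r', c') ∈ s := by
        rw [PySem.Set.mem_add]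
        constructor
        · rintro (hh | hh)
          · exact hh
          · exact absurd ⟨congrArg Prod.fst hh, congrArg Prod.snd hh⟩ h
        · exact Or.inl
      simp [this]
  · intro p hp
    rw [PySem.Set.mem_add] at hp
    rcases hp with hp | hp
    · exact hw p hp
    · subst hp; exact ⟨hr, hc⟩
  · rw [PySem.Set.add_eq_ite]
    by_cases h : (r, c) ∈ s
    · have : get2 v r c false = true := by rw [hInd r c]; simpa using h
      simp [h, this]
    · have : get2 v r c false = false := by rw [hInd r c]; simpa using h
      simp [h, this]

theorem cell_step {M N : Nat} {b : List (List Char)} (hb : Shape M N b) {i j : Nat}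
    (hi : i + 1 < M) (hj : j + 1 < N) {ans : Int}
    {st : List (List Bool) × Int × Bool} {s : List (Nat × Nat)}
    (h : InvS M N ans st s) : InvS M N ans (AcellA b M N i st j) (Scell b i s j) := by
  obtain ⟨hInd, hSh, hAns, hDone, hWin⟩ := h
  unfold AcellA Scell
  by_cases hval : (get2 b i j ' ' == ' ') = true
  · have hbl : blockB b i j = false := by
      unfold blockB
      simp only [hval]
      simp
    rw [hbl]
    simp only [hval, if_true, if_false]
    exact ⟨hInd, hSh, hAns, hDone, hWin⟩
  · have hval' : (get2 b i j ' ' == ' ') = false := by simpa using hval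
    simp only [hval', if_false, Bool.false_eq_true]
    unfold checkA
    rw [checkOk_iff b hi hj hval']
    by_cases hbl : blockB b i j = true
    · rw [hbl]
      simp only [if_true]
      have hmap : ([(i, j), (i, j + 1), (i + 1, j), (i + 1, j + 1)] :
          List (Nat × Nat)) = yxA.map (fun p => (i + p.1, j + p.2)) := by
        simp [yxA]
      rw [hmap, PySem.Set.update_map_eq_foldl_add]
      have hyx : ∀ p ∈ yxA, p.1 ≤ 1 ∧ p.2 ≤ 1 := by decide
      have hrel := foldl_rel
        (R := fun (p : List (List Bool) × Int) (q : List (Nat × Nat)) =>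
          Ind p.1 q ∧ Shape M N p.1 ∧ Window M N q ∧
          ((q.length : Int) = s.length + p.2))
        yxA
        (fun (st : List (List Bool) × Int) p =>
          (set2 st.1 (i + p.1) (j + p.2) true,
           st.2 + (if get2 st.1 (i + p.1) (j + p.2) false then 0 else 1)))
        (fun s p => PySem.Set.add s (i + p.1, j + p.2))
        (by
          rintro ⟨v1, cnt⟩ q p hp ⟨h1, h2, h3, h4⟩
          have hp1 : i + p.1 < M := by have := (hyx p hp).1; omega
          have hp2 : j + p.2 < N := by have := (hyx p hp).2; omega
          obtain ⟨m1, m2, m3, m4⟩ := mark_one h2 h1 h3 hp1 hp2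
          exact ⟨m1, m2, m3, by rw [m4]; push_cast [h4]; ring⟩)
        (a := (st.1, 0)) (b := s) ⟨hInd, hSh, hWin, by simp⟩
      obtain ⟨r1, r2, r3, r4⟩ := hrel
      have hmark : markA st.1 i j =
          yxA.foldl (fun (st : List (List Bool) × Int) p =>
            (set2 st.1 (i + p.1) (j + p.2) true,
             st.2 + (if get2 st.1 (i + p.1) (j + p.2) false then 0 else 1)))
            (st.1, 0) := rfl
      rw [← hmark] at r1 r2 r4
      set s' := yxA.foldl (fun s p => PySem.Set.add s (i + p.1, j + p.2)) s with hs'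
      have hmem : (i, j) ∈ s' := by
        rw [hs', PySem.Set.mem_foldl_add]
        exact Or.inr ⟨(0, 0), by decide, by simp⟩
      refine ⟨r1, r2, ?_, ?_, r3⟩
      · rw [hAns, r4]; ring
      · by_cases hz : (markA st.1 i j).2 = 0
        · have hlen : (s'.length : Int) = s.length := by rw [r4, hz]; ring
          have hlen' : s'.length = s.length := by exact_mod_cast hlen
          have : s'.isEmpty = s.isEmpty := by
            rw [Bool.eq_iff_iff, List.isEmpty_iff_length_eq_zero,
              List.isEmpty_iff_length_eq_zero, hlen']
          rw [this, ← hDone, hz]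
          simp
        · have hz' : ((markA st.1 i j).2 == 0) = false := by simpa using hz
          rw [hz']
          have : s'.isEmpty = false := by
            rw [Bool.eq_false_iff]
            intro hh
            rw [List.isEmpty_iff] at hh
            rw [hh] at hmem
            exact absurd hmem (List.not_mem_nil)
          rw [this]
          simp
    · have hbl' : blockB b i j = false := by simpa using hbl
      rw [hbl']
      simp only [Bool.false_eq_true, if_false]
      refine ⟨hInd, hSh, by simpa using hAns, ?_, hWin⟩
      simpa using hDone

theorem scanA_spec {M N : Nat} {b : List (List Char)} (hb : Shape M N b) (ans : Int) :
    Ind (scanA b (falseGrid M N) M N ans).1 (collectS b M N) ∧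
    Shape M N (scanA b (falseGrid M N) M N ans).1 ∧
    (scanA b (falseGrid M N) M N ans).2.1 = ans + (collectS b M N).length ∧
    (scanA b (falseGrid M N) M N ans).2.2 = (collectS b M N).isEmpty ∧
    Window M N (collectS b M N) := by
  suffices h : InvS M N ans (scanA b (falseGrid M N) M N ans) (collectS b M N) by
    exact ⟨h.1, h.2.1, h.2.2.1, h.2.2.2.1, h.2.2.2.2⟩
  rw [scanA_eq_fold, hb.1]
  show InvS M N ans _ (collectS b M N)
  unfold collectS
  have hinner : ∀ i, i < M → (b.getD i []).length = N := by
    intro i hi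
    have hib : i < b.length := by rw [hb.1]; exact hi
    rw [List.getD_eq_getElem b [] hib]
    exact hb.2 _ (List.getElem_mem hib)
  have houter : (List.range M).foldl (fun st i =>
      (List.range (b.getD i []).length).foldl (AcellA b M N i) st)
      (falseGrid M N, ans, true) = (List.range M).foldl (fun st i =>
      (List.range N).foldl (AcellA b M N i) st) (falseGrid M N, ans, true) := by
    apply PySem.List.foldl_congr_mem
    intro acc i hi
    rw [hinner i (List.mem_range.mp hi)]
  rw [houter]
  have hinit : InvS M N ans (falseGrid M N, ans, true) [] :=
    ⟨fun r c => by simp [get2_falseGrid], shape_falseGrid M N, by simp, by simp,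
     by intro p hp; exact absurd hp (List.not_mem_nil)⟩
  rcases Nat.eq_zero_or_pos M with hM | hM
  · rw [hM] at hinit ⊢
    simp only [List.range_zero, List.foldl_nil, Nat.zero_sub]
    exact hinit
  rcases Nat.eq_zero_or_pos N with hN | hN
  · have hA : ∀ (st : List (List Bool) × Int × Bool) i,
        (List.range N).foldl (AcellA b M N i) st = st := by
      intro st i; rw [hN]; rfl
    rw [foldl_id _ _ (fun st i _ => hA st i)]
    have : N - 1 = 0 := by omega
    rw [this]
    simp only [List.range_zero, List.foldl_nil]
    rw [foldl_id _ _ (fun s i _ => rfl)]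
    exact hinit
  · have hMsplit : List.range M = List.range (M - 1) ++ [M - 1] := by
      conv_lhs => rw [show M = (M - 1) + 1 by omega]
      rw [List.range_succ]
    rw [hMsplit, List.foldl_append]
    have hlast : ∀ st : List (List Bool) × Int × Bool,
        (List.range N).foldl (AcellA b M N (M - 1)) st = st := by
      intro st
      apply foldl_id
      intro a j _
      exact cell_boundary b (fun hh => by omega) a
    simp only [List.foldl_cons, List.foldl_nil]
    rw [hlast]
    apply foldl_rel (InvS M N ans) (List.range (M - 1)) _ _ ?_ hinit
    intro st s i hi hI
    have hiM : i < M - 1 := List.mem_range.mp hi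
    have hNsplit : List.range N = List.range (N - 1) ++ [N - 1] := by
      conv_lhs => rw [show N = (N - 1) + 1 by omega]
      rw [List.range_succ]
    rw [hNsplit, List.foldl_append]
    simp only [List.foldl_cons, List.foldl_nil]
    rw [cell_boundary b (fun hh => by omega)]
    apply foldl_rel (InvS M N ans) (List.range (N - 1)) _ _ ?_ hI
    intro st' s' j hj hI'
    have hjN : j < N - 1 := List.mem_range.mp hj
    exact cell_step hb (by omega) (by omega) hI'

-- membership in the collected set is exactly the covered-cell predicate
theorem mem_Scell {b : List (List Char)} {i : Nat} (p : Nat × Nat)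
    (s : PySem.Set (Nat × Nat)) (j : Nat) :
    p ∈ Scell b i s j ↔ p ∈ s ∨ (blockB b i j = true ∧
      p ∈ ([(i, j), (i, j + 1), (i + 1, j), (i + 1, j + 1)] : List (Nat × Nat))) := by
  unfold Scell
  by_cases h : blockB b i j = true
  · rw [if_pos h, PySem.Set.mem_update]
    simp [h]
  · rw [if_neg h]
    simp [h]

theorem mem_collectS {b : List (List Char)} {M N : Nat} (p : Nat × Nat) :
    p ∈ collectS b M N ↔ CoveredP b M N p.1 p.2 := by
  unfold collectS
  rw [mem_foldl_gen (fun s => p ∈ s) _ _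
    (fun i => ∃ j ∈ List.range (N - 1), blockB b i j = true ∧
      p ∈ ([(i, j), (i, j + 1), (i + 1, j), (i + 1, j + 1)] : List (Nat × Nat)))
    (fun s i _ => mem_foldl_gen (fun s => p ∈ s) _ _
      (fun j => blockB b i j = true ∧
        p ∈ ([(i, j), (i, j + 1), (i + 1, j), (i + 1, j + 1)] : List (Nat × Nat)))
      (fun s j _ => mem_Scell p s j) s)]
  unfold CoveredP
  constructor
  · rintro (h | ⟨i, hi, j, hj, hbl, hmem⟩)
    · exact absurd h (List.not_mem_nil)
    · refine ⟨i, j, by have := List.mem_range.mp hi; omega,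
        by have := List.mem_range.mp hj; omega, hbl, ?_⟩
      have : p ∈ yxA.map (fun d => (i + d.1, j + d.2)) := by
        simpa [yxA] using hmem
      obtain ⟨d, hd, hpd⟩ := List.mem_map.mp this
      exact ⟨d, hd, hpd.symm⟩
  · rintro ⟨i, j, hi, hj, hbl, d, hd, hpd⟩
    refine Or.inr ⟨i, List.mem_range.mpr (by omega), j, List.mem_range.mpr (by omega),
      hbl, ?_⟩
    have : p ∈ yxA.map (fun d => (i + d.1, j + d.2)) :=
      List.mem_map.mpr ⟨d, hd, by rw [← hpd]⟩
    simpa [yxA] using this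

theorem nodup_collectS (b : List (List Char)) (M N : Nat) :
    (collectS b M N).Nodup := by
  unfold collectS
  apply foldl_pres List.Nodup
  · intro s i _ hs
    apply foldl_pres List.Nodup _ _ _ hs
    intro s j _ hs
    unfold Scell
    by_cases h : blockB b i j = true
    · rw [if_pos h]; exact PySem.Set.nodup_update _ _ hs
    · rw [if_neg h]; exact hs
  · exact List.nodup_nil

-- the covered predicate, read off B's per-cell test on the column projection
theorem get2_colsOf (g : List (List Char)) (M N j i : Nat) :
    get2 (colsOf g M N) j i ' ' = if i < M ∧ j < N then get2 g i j ' ' else ' ' := by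
  unfold colsOf
  show ((((List.range N).map _).getD j []).getD i ' ') = _
  by_cases hj : j < N
  · rw [List.getD_eq_getElem ((List.range N).map _) [] (by simpa using hj)]
    simp only [List.getElem_map, List.getElem_range]
    by_cases hi : i < M
    · rw [List.getD_eq_getElem _ ' ' (by simpa using hi)]
      simp only [List.getElem_map, List.getElem_range]
      simp [hi, hj]
    · rw [List.getD_eq_default _ _ (by simpa using hi)]
      simp [hi]
  · rw [List.getD_eq_default ((List.range N).map _) [] (by simpa using hj)]
    simp [hj]

theorem blockB_cells {g : List (List Char)} {i j : Nat} (h : blockB g i j = true) :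
    ¬ get2 g i j ' ' = ' ' ∧ get2 g i (j + 1) ' ' = get2 g i j ' ' ∧
      get2 g (i + 1) j ' ' = get2 g i j ' ' ∧
      get2 g (i + 1) (j + 1) ' ' = get2 g i j ' ' := by
  unfold blockB at h
  simp only [Bool.and_eq_true, Bool.not_eq_eq_eq_not, Bool.not_true, beq_eq_false_iff_ne,
    ne_eq, beq_iff_eq] at h
  obtain ⟨⟨⟨h0, h1⟩, h2⟩, h3⟩ := h
  exact ⟨h0, h1.symm, h2.symm, h3.symm⟩

theorem erasedB_iff {g : List (List Char)} {M N : Nat} (i j : Nat) :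
    erasedB (colsOf g M N) M N j i = true ↔ CoveredP g M N i j := by
  constructor
  · intro h
    unfold erasedB at h
    simp only [Bool.and_eq_true, List.any_eq_true, beq_iff_eq,
      Bool.not_eq_eq_eq_not, Bool.not_true, beq_eq_false_iff_ne, ne_eq,
      decide_eq_true_eq] at h
    obtain ⟨hv, d, hd, ⟨⟨⟨⟨⟨⟨hd1, hd2⟩, hm⟩, hn⟩, e00⟩, e01⟩, e10⟩, e11⟩ := h
    rw [get2_colsOf, if_pos ⟨by omega, by omega⟩] at e00
    rw [get2_colsOf, if_pos ⟨by omega, by omega⟩] at e01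
    rw [get2_colsOf, if_pos ⟨by omega, by omega⟩] at e10
    rw [get2_colsOf, if_pos ⟨by omega, by omega⟩] at e11
    refine ⟨i - d.1, j - d.2, by omega, by omega, ?_, d, ?_, ?_⟩
    · unfold blockB
      rw [e00]
      simp only [Bool.and_eq_true, Bool.not_eq_eq_eq_not, Bool.not_true,
        beq_eq_false_iff_ne, ne_eq, beq_iff_eq]
      exact ⟨⟨⟨hv, e10.symm ▸ rfl⟩, e01.symm ▸ rfl⟩, e11.symm ▸ rfl⟩
    · simpa [yxA] using hd
    · simp only [Prod.mk.injEq]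
      omega
  · rintro ⟨i0, j0, hiM, hjN, hbl, d, hd, hpd⟩
    obtain ⟨hne, cR, cD, cDR⟩ := blockB_cells hbl
    have hd4 : d = ((0 : Nat), (0 : Nat)) ∨ d = (0, 1) ∨ d = (1, 0) ∨ d = (1, 1) := by
      simpa [yxA] using hd
    have hi : i = i0 + d.1 := congrArg Prod.fst hpd
    have hj : j = j0 + d.2 := congrArg Prod.snd hpd
    have hdle : d.1 ≤ 1 ∧ d.2 ≤ 1 := by
      obtain rfl | rfl | rfl | rfl := hd4 <;> simp
    have hiW : i < M := by omega
    have hjW : j < N := by omega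
    have hv : get2 (colsOf g M N) j i ' ' = get2 g i0 j0 ' ' := by
      rw [get2_colsOf, if_pos ⟨hiW, hjW⟩, hi, hj]
      obtain rfl | rfl | rfl | rfl := hd4 <;> simp [cR, cD, cDR]
    have e1 : i - d.1 = i0 := by omega
    have e2 : j - d.2 = j0 := by omega
    unfold erasedB
    simp only [Bool.and_eq_true, List.any_eq_true, beq_iff_eq,
      Bool.not_eq_eq_eq_not, Bool.not_true, beq_eq_false_iff_ne, ne_eq,
      decide_eq_true_eq]
    refine ⟨by rw [hv]; exact hne, d, by simpa [yxA] using hd,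
      ⟨⟨⟨⟨⟨⟨by omega, by omega⟩, by omega⟩, by omega⟩, ?_⟩, ?_⟩, ?_⟩, ?_⟩
    · rw [e1, e2, hv, get2_colsOf, if_pos ⟨by omega, by omega⟩]
    · rw [e1, e2, hv, get2_colsOf, if_pos ⟨by omega, by omega⟩]
      exact cD
    · rw [e1, e2, hv, get2_colsOf, if_pos ⟨by omega, by omega⟩]
      exact cR
    · rw [e1, e2, hv, get2_colsOf, if_pos ⟨by omega, by omega⟩]
      exact cDR

theorem coveredP_window {g : List (List Char)} {M N r c : Nat}
    (h : CoveredP g M N r c) : r < M ∧ c < N := by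
  obtain ⟨i, j, hi, hj, _, d, hd, hpd⟩ := h
  have : r = i + d.1 ∧ c = j + d.2 := ⟨congrArg Prod.fst hpd, congrArg Prod.snd hpd⟩
  have hdle : d.1 ≤ 1 ∧ d.2 ≤ 1 := by fin_cases hd <;> simp
  omega

-- counting: B's per-column count sums to the size of the erased set
theorem count_lemma (M N : Nat) (s : List (Nat × Nat)) (hnd : s.Nodup)
    (q : Nat → Nat → Bool) (h : ∀ i j : Nat, (i, j) ∈ s ↔ q j i = true)
    (hw : ∀ p ∈ s, p.1 < M ∧ p.2 < N) :
    ((List.range N).map (fun j => ((List.range M).filter (fun i => q j i)).length)).sum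
      = s.length := by
  have hbridge : ∀ (K : Nat) (r : Nat → Bool),
      ((List.range K).filter r).length
        = (Finset.filter (fun i => r i = true) (Finset.range K)).card := by
    intro K r
    simp [Finset.filter, Finset.card, Finset.range, Multiset.range, Multiset.filter_coe]
  have h1 : s.toFinset
      = ((Finset.range M) ×ˢ (Finset.range N)).filter (fun p => q p.2 p.1 = true) := by
    ext p
    simp only [List.mem_toFinset, Finset.mem_filter, Finset.mem_product, Finset.mem_range]
    constructor
    · intro hp
      exact ⟨⟨(hw p hp).1, (hw p hp).2⟩, (h p.1 p.2).mp (by simpa using hp)⟩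
    · rintro ⟨_, hq⟩
      simpa using (h p.1 p.2).mpr hq
  have h2 : s.length = s.toFinset.card := (List.toFinset_card_of_nodup hnd).symm
  rw [h2, h1, Finset.card_filter, Finset.sum_product, Finset.sum_comm]
  have h3 : ∀ j, (∑ i ∈ Finset.range M, if q j i = true then 1 else 0)
      = ((List.range M).filter (fun i => q j i)).length := by
    intro j
    rw [hbridge M (fun i => q j i), Finset.card_filter]
  have hsum : ∀ (K : Nat) (f : Nat → Nat),
      ((List.range K).map f).sum = ∑ j ∈ Finset.range K, f j := by
    intro K f
    induction K with
    | zero => simp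
    | succ K ih =>
      rw [List.range_succ, Finset.sum_range_succ, List.map_append, List.sum_append, ih]
      simp
  calc ((List.range N).map (fun j => ((List.range M).filter (fun i => q j i)).length)).sum
      = ∑ j ∈ Finset.range N, ((List.range M).filter (fun i => q j i)).length := hsum N _
    _ = ∑ j ∈ Finset.range N, ∑ i ∈ Finset.range M, if q j i = true then 1 else 0 := by
        apply Finset.sum_congr rfl; intro j _; rw [h3]
    _ = _ := rfl

theorem cnt_eq_length {g : List (List Char)} {M N : Nat} :
    cntB (colsOf g M N) M N = (collectS g M N).length := by
  unfold cntB
  rw [PySem.List.foldl_add_nat, Nat.zero_add]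
  apply count_lemma M N _ (nodup_collectS g M N)
  · intro i j
    rw [show ((i, j) ∈ collectS g M N) ↔ CoveredP g M N i j from mem_collectS (i, j)]
    exact (erasedB_iff i j).symm
  · intro p hp
    exact coveredP_window ((mem_collectS p).mp hp)

-- ===== the column lemma: A's count-and-shift gravity is filter-and-restack =====
theorem scan_info_append (col : List Char) (l : List Nat) :
    ∀ (i0 : List (Nat × Nat)) (c : Nat),
      l.foldl (sstep col) (i0, c) =
        (i0 ++ (l.foldl (sstep col) ([], c)).1, (l.foldl (sstep col) ([], c)).2) := by
  induction l with
  | nil => intro i0 c; simp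
  | cons x xs ih =>
    intro i0 c
    simp only [List.foldl_cons]
    by_cases h1 : (col.getD x ' ' == ' ') = true
    · have e1 : sstep col (i0, c) x = (i0, c + 1) := by unfold sstep; rw [if_pos h1]
      have e2 : sstep col ([], c) x = ([], c + 1) := by unfold sstep; rw [if_pos h1]
      rw [e1, e2, ih i0 (c + 1), ih [] (c + 1)]
    · by_cases h2 : c > 0
      · have e1 : sstep col (i0, c) x = (i0 ++ [(x, c)], c) := by
          unfold sstep; rw [if_neg h1, if_pos h2]
        have e2 : sstep col ([], c) x = ([(x, c)], c) := by
          unfold sstep; rw [if_neg h1, if_pos h2]; rfl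
        rw [e1, e2, ih (i0 ++ [(x, c)]) c, ih [(x, c)] c]
        simp
      · have e1 : sstep col (i0, c) x = (i0, c) := by
          unfold sstep; rw [if_neg h1, if_neg h2]
        have e2 : sstep col ([], c) x = ([], c) := by
          unfold sstep; rw [if_neg h1, if_neg h2]
        rw [e1, e2, ih i0 c]

theorem stack_cons_blank (r : List Char) : stack (' ' :: r) = ' ' :: stack r := by
  have hk : (keptOf r).length ≤ r.length := List.length_filter_le _ r
  unfold stack keptOf
  have hfil : List.filter (fun x => !(x == ' ')) (' ' :: r) =
      List.filter (fun x => !(x == ' ')) r := by simp [List.filter_cons]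
  rw [hfil]
  rw [show (' ' :: r).length - (List.filter (fun x => !(x == ' ')) r).length =
      (r.length - (List.filter (fun x => !(x == ' ')) r).length) + 1 from by
    simp only [List.length_cons]
    unfold keptOf at hk
    omega]
  rw [List.replicate_succ]
  rfl

theorem stack_of_no_blank {r : List Char} (h : keptOf r = r) : stack r = r := by
  simp [stack, h]

theorem moves_inv (col : List Char) :
    ∀ (t : Nat), t ≤ col.length → ∀ (s : List Char) (c : Nat),
      c = (col.drop t).length - (keptOf (col.drop t)).length →
      s.length = col.length →
      (∀ q, q < t → s.getD q ' ' = col.getD q ' ') →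
      s.drop t = stack (col.drop t) →
      movesCol ((List.range t).reverse.foldl (sstep col) ([], c)).1 s = stack col := by
  intro t
  induction t with
  | zero =>
    intro _ s c _ _ _ hdrop
    simp only [List.range_zero, List.reverse_nil, List.foldl_nil]
    unfold movesCol
    simp only [List.foldl_nil]
    simpa using hdrop
  | succ t ih =>
    intro ht s c hc hlen hpre hdrop
    have htl : t < col.length := by omega
    have hst : s.getD t ' ' = col.getD t ' ' := hpre t (by omega)
    have hsdropt : s.drop t = s.getD t ' ' :: s.drop (t + 1) := by
      rw [List.getD_eq_getElem s ' ' (by omega)]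
      exact List.drop_eq_getElem_cons (by omega)
    have hcdropt : col.drop t = col.getD t ' ' :: col.drop (t + 1) := by
      rw [List.getD_eq_getElem col ' ' htl]
      exact List.drop_eq_getElem_cons htl
    have hsplit : (List.range (t + 1)).reverse = t :: (List.range t).reverse := by
      rw [List.range_succ, List.reverse_append]
      simp
    rw [hsplit]
    simp only [List.foldl_cons]
    have hkle : (keptOf (col.drop (t + 1))).length ≤ (col.drop (t + 1)).length :=
      List.length_filter_le _ _
    have hdl : (col.drop (t + 1)).length = col.length - (t + 1) := by simp
    by_cases hblank : (col.getD t ' ' == ' ') = true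
    · have hb' : col.getD t ' ' = ' ' := by simpa using hblank
      have hstep : sstep col ([], c) t = ([], c + 1) := by
        unfold sstep; rw [if_pos hblank]
      rw [hstep]
      apply ih (by omega) s (c + 1) ?_ hlen (fun q hq => hpre q (by omega)) ?_
      · have hfil : keptOf (col.drop t) = keptOf (col.drop (t + 1)) := by
          rw [hcdropt, hb']
          unfold keptOf
          simp [List.filter_cons]
        rw [hfil, hcdropt]
        simp only [List.length_cons]
        omega
      · have hista : stack (col.drop t) = ' ' :: stack (col.drop (t + 1)) := by
          rw [hcdropt, hb', stack_cons_blank]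
        rw [hista, hsdropt, hst, hb', hdrop]
    · have hb' : ¬ col.getD t ' ' = ' ' := by simpa using hblank
      have hbb : (!(col.getD t ' ' == ' ')) = true := by simpa using hb'
      have hkeptc : keptOf (col.drop t) =
          col.getD t ' ' :: keptOf (col.drop (t + 1)) := by
        rw [hcdropt]
        unfold keptOf
        rw [List.filter_cons]
        simp only [hbb, if_true]
      by_cases hcz : c = 0
      · subst hcz
        have hstep : sstep col ([], 0) t = ([], 0) := by
          unfold sstep; rw [if_neg hblank]; simp
        rw [hstep]
        have hnb : keptOf (col.drop (t + 1)) = col.drop (t + 1) := by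
          apply List.Sublist.eq_of_length List.filter_sublist
          show (keptOf (col.drop (t + 1))).length = (col.drop (t + 1)).length
          omega
        have hnb2 : keptOf (col.drop t) = col.drop t := by
          rw [hkeptc, hnb, ← hcdropt]
        apply ih (by omega) s 0 ?_ hlen (fun q hq => hpre q (by omega)) ?_
        · rw [hkeptc, hnb, hcdropt]
          simp
        · rw [hsdropt, hst, hdrop, stack_of_no_blank hnb, stack_of_no_blank hnb2,
            hcdropt]
      · have hcpos : c > 0 := by omega
        have hstep : sstep col ([], c) t = ([(t, c)], c) := by
          unfold sstep; rw [if_neg hblank, if_pos hcpos]; rfl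
        rw [hstep]
        rw [scan_info_append col (List.range t).reverse [(t, c)] c]
        unfold movesCol
        rw [List.foldl_append]
        simp only [List.foldl_cons, List.foldl_nil]
        have hclen : c ≤ (col.drop (t + 1)).length := by
          omega
        have htc : t + c < s.length := by
          rw [hlen]
          omega
        set s' := ((s.set (t + c) (s.getD t ' ')).set t ' ') with hs'
        show movesCol ((List.range t).reverse.foldl (sstep col) ([], c)).1 s' = stack col
        apply ih (by omega) s' c ?_ (by simp [hs', hlen]) ?_ ?_
        · rw [hkeptc, hcdropt]
          simp only [List.length_cons]
          omega
        · intro q hq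
          rw [hs', getD_set_ne' _ (by omega), getD_set_ne' _ (by omega)]
          exact hpre q (by omega)
        · have hstackt : stack (col.drop t) =
              List.replicate c ' ' ++ col.getD t ' ' :: keptOf (col.drop (t + 1)) := by
            unfold stack
            rw [hkeptc, hcdropt]
            simp only [List.length_cons]
            have hx : (col.drop (t + 1)).length + 1 -
                ((keptOf (col.drop (t + 1))).length + 1) = c := by omega
            rw [hx]
          have hstackt1 : stack (col.drop (t + 1)) =
              List.replicate ((c - 1) + 1) ' ' ++ keptOf (col.drop (t + 1)) := by
            unfold stack
            have hx : (col.drop (t + 1)).length -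
                (keptOf (col.drop (t + 1))).length = (c - 1) + 1 := by omega
            rw [hx]
          rw [hs']
          rw [List.drop_set, if_neg (by omega), List.drop_set, if_neg (by omega)]
          rw [Nat.add_sub_cancel_left, Nat.sub_self]
          rw [hsdropt, hst, hdrop, hstackt1]
          rw [show (c : Nat) = (c - 1) + 1 from by omega]
          rw [List.replicate_succ', List.append_assoc, List.set_cons_succ,
            List.set_append, if_neg (by simp)]
          simp only [List.length_replicate, Nat.add_sub_cancel, Nat.sub_self]
          rw [List.set_cons_zero, hstackt]
          have hset : (([' '] : List Char) ++ keptOf (col.drop (t + 1))).set 0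
              (col.getD t ' ') = col.getD t ' ' :: keptOf (col.drop (t + 1)) := by simp
          rw [hset]
          have hc1 : c - 1 + 1 = c := Nat.succ_pred_eq_of_pos hcpos
          conv_rhs => rw [← hc1, List.replicate_succ]
          rfl

theorem stack_moves (col : List Char) :
    movesCol ((List.range col.length).reverse.foldl (sstep col) ([], 0)).1 col =
      stack col := by
  apply moves_inv col col.length (le_refl _) col 0
  · simp [keptOf]
  · rfl
  · intro q _; rfl
  · simp [stack, keptOf]

-- ===== the erase phase =====
theorem pass2_eq (b : List (List Char)) (c m : Nat) :
    erasePass2A b c m = ((List.range m).reverse.foldl (sstep (getCol b c)) ([], 0)).1 := by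
  unfold erasePass2A
  congr 1
  apply PySem.List.foldl_congr_mem
  intro acc x _
  unfold sstep
  rw [getD_getCol]

-- the blanked column (what pass1 leaves in column c)
def blankCol (g : List (List Char)) (v : List (List Bool)) (c M : Nat) : List Char :=
  (List.range M).map (fun r => if get2 v r c false then ' ' else get2 g r c ' ')

theorem getCol_getElem {b : List (List Char)} {c r : Nat} (h : r < b.length)
    (h' : r < (getCol b c).length) : (getCol b c)[r] = get2 b r c ' ' := by
  rw [← List.getD_eq_getElem (getCol b c) ' ' h', getD_getCol]

theorem getCol_eq_map_range {M N : Nat} {b : List (List Char)} (hb : Shape M N b)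
    (c : Nat) : getCol b c = (List.range M).map (fun r => get2 b r c ' ') := by
  apply List.ext_getElem (by simp [getCol, hb.1])
  intro r h1 h2
  rw [getCol_getElem (by rw [hb.1]; simpa using h2)]
  simp

theorem get2_of_getCol_eq {b b' : List (List Char)} {c : Nat}
    (h : getCol b c = getCol b' c) (r : Nat) :
    get2 b r c ' ' = get2 b' r c ' ' := by
  rw [← getD_getCol, ← getD_getCol, h]

theorem pass1_pointwise {M N : Nat} {b : List (List Char)} {v : List (List Bool)}
    (hb : Shape M N b) (hv : Shape M N v) {c : Nat} (hc : c < N) :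
    ∀ (K : Nat), K ≤ M →
      (∀ r' c', get2 ((List.range K).foldl
          (fun (st : List (List Char) × List (List Bool)) r =>
            if get2 st.2 r c false then (set2 st.1 r c ' ', set2 st.2 r c false) else st)
          (b, v)).1 r' c' ' ' =
        if c' = c ∧ r' < K ∧ get2 v r' c false = true then ' ' else get2 b r' c' ' ') ∧
      (∀ r' c', get2 ((List.range K).foldl
          (fun (st : List (List Char) × List (List Bool)) r =>
            if get2 st.2 r c false then (set2 st.1 r c ' ', set2 st.2 r c false) else st)
          (b, v)).2 r' c' false =
        if c' = c ∧ r' < K then false else get2 v r' c' false) ∧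
      Shape M N ((List.range K).foldl
          (fun (st : List (List Char) × List (List Bool)) r =>
            if get2 st.2 r c false then (set2 st.1 r c ' ', set2 st.2 r c false) else st)
          (b, v)).1 ∧
      Shape M N ((List.range K).foldl
          (fun (st : List (List Char) × List (List Bool)) r =>
            if get2 st.2 r c false then (set2 st.1 r c ' ', set2 st.2 r c false) else st)
          (b, v)).2 := by
  intro K
  induction K with
  | zero =>
    intro _
    refine ⟨?_, ?_, hb, hv⟩
    · intro r' c'; simp
    · intro r' c'; simp
  | succ K ih =>
    intro hKM
    obtain ⟨ihb, ihv, ihsb, ihsv⟩ := ih (by omega)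
    rw [List.range_succ, List.foldl_append, List.foldl_cons, List.foldl_nil]
    set P := (List.range K).foldl
      (fun (st : List (List Char) × List (List Bool)) r =>
        if get2 st.2 r c false then (set2 st.1 r c ' ', set2 st.2 r c false) else st)
      (b, v) with hP
    have hread : get2 P.2 K c false = get2 v K c false := by
      rw [ihv K c]
      simp
    by_cases hcond : get2 P.2 K c false = true
    · rw [if_pos hcond]
      have hvKc : get2 v K c false = true := by rw [← hread]; exact hcond
      refine ⟨?_, ?_, shape_set2 ihsb K c ' ', shape_set2 ihsv K c false⟩
      · intro r' c'
        rw [get2_set2 ihsb (by omega) hc ' ' r' c' ' ', ihb r' c']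
        by_cases h1 : r' = K ∧ c' = c
        · obtain ⟨rfl, rfl⟩ := h1
          simp [hvKc]
        · rw [if_neg h1]
          by_cases h2 : c' = c ∧ r' < K ∧ get2 v r' c false = true
          · rw [if_pos h2, if_pos ⟨h2.1, by omega, h2.2.2⟩]
          · rw [if_neg h2, if_neg (by
              rintro ⟨hh1, hh2, hh3⟩
              exact h2 ⟨hh1, by
                rcases Nat.lt_or_ge r' K with hlt | hge
                · exact hlt
                · exact absurd ⟨by omega, hh1⟩ h1, hh3⟩)]
      · intro r' c'
        rw [get2_set2 ihsv (by omega) hc false r' c' false, ihv r' c']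
        by_cases h1 : r' = K ∧ c' = c
        · obtain ⟨rfl, rfl⟩ := h1
          simp
        · rw [if_neg h1]
          by_cases h2 : c' = c ∧ r' < K
          · rw [if_pos h2, if_pos ⟨h2.1, by omega⟩]
          · rw [if_neg h2, if_neg (by
              rintro ⟨hh1, hh2⟩
              exact h2 ⟨hh1, by
                rcases Nat.lt_or_ge r' K with hlt | hge
                · exact hlt
                · exact absurd ⟨by omega, hh1⟩ h1⟩)]
    · rw [if_neg hcond]
      have hvKc : get2 v K c false = false := by
        rw [← hread]; simpa using hcond
      refine ⟨?_, ?_, ihsb, ihsv⟩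
      · intro r' c'
        rw [ihb r' c']
        by_cases h2 : c' = c ∧ r' < K + 1 ∧ get2 v r' c false = true
        · obtain ⟨hh1, hh2, hh3⟩ := h2
          have : r' < K := by
            rcases Nat.lt_or_ge r' K with hlt | hge
            · exact hlt
            · have : r' = K := by omega
              rw [this] at hh3
              rw [hh3] at hvKc
              exact absurd hvKc (by simp)
          rw [if_pos ⟨hh1, this, hh3⟩, if_pos ⟨hh1, by omega, hh3⟩]
        · rw [if_neg (fun ⟨a1, a2, a3⟩ => h2 ⟨a1, by omega, a3⟩), if_neg h2]
      · intro r' c'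
        rw [ihv r' c']
        by_cases h2 : c' = c ∧ r' < K + 1
        · obtain ⟨hh1, hh2⟩ := h2
          rcases Nat.lt_or_ge r' K with hlt | hge
          · rw [if_pos ⟨hh1, hlt⟩, if_pos ⟨hh1, by omega⟩]
          · have : r' = K := by omega
            subst this
            subst hh1
            rw [if_neg (by omega), if_pos ⟨rfl, by omega⟩]
            exact hvKc
        · rw [if_neg (fun ⟨a1, a2⟩ => h2 ⟨a1, by omega⟩), if_neg h2]

theorem pass1_spec {M N : Nat} {b : List (List Char)} {v : List (List Bool)}
    (hb : Shape M N b) (hv : Shape M N v) {c : Nat} (hc : c < N) :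
    getCol (erasePass1A b v c M).1 c = blankCol b v c M ∧
    (∀ c', c' ≠ c → getCol (erasePass1A b v c M).1 c' = getCol b c') ∧
    (∀ r' c', get2 (erasePass1A b v c M).2 r' c' false =
        if c' = c then false else get2 v r' c' false) ∧
    Shape M N (erasePass1A b v c M).1 ∧ Shape M N (erasePass1A b v c M).2 := by
  obtain ⟨h1, h2, h3, h4⟩ := pass1_pointwise hb hv hc M (le_refl M)
  have hP : erasePass1A b v c M = (List.range M).foldl
      (fun (st : List (List Char) × List (List Bool)) r =>
        if get2 st.2 r c false then (set2 st.1 r c ' ', set2 st.2 r c false) else st)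
      (b, v) := rfl
  refine ⟨?_, ?_, ?_, by rw [hP]; exact h3, by rw [hP]; exact h4⟩
  · rw [getCol_eq_map_range (by rw [hP]; exact h3) c]
    unfold blankCol
    apply List.map_congr_left
    intro r hr
    have hrM : r < M := List.mem_range.mp hr
    rw [hP, h1 r c]
    by_cases hvr : get2 v r c false = true
    · rw [if_pos ⟨rfl, hrM, hvr⟩, if_pos hvr]
    · rw [if_neg (fun ⟨_, _, a3⟩ => hvr a3), if_neg hvr]
  · intro c' hne
    rw [getCol_eq_map_range (by rw [hP]; exact h3) c', getCol_eq_map_range hb c']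
    apply List.map_congr_left
    intro r _
    rw [hP, h1 r c', if_neg (fun ⟨a1, _, _⟩ => hne a1)]
  · intro r' c'
    rw [hP, h2 r' c']
    by_cases hcc : c' = c
    · subst hcc
      rw [if_pos rfl]
      by_cases hr : r' < M
      · rw [if_pos ⟨rfl, hr⟩]
      · rw [if_neg (fun hh => hr hh.2)]
        exact get2_beyond_shape hv (Or.inl (by omega)) false
    · rw [if_neg hcc, if_neg (fun ⟨a1, _⟩ => hcc a1)]

theorem pass3_spec {M N : Nat} {c : Nat} (hc : c < N) (info : List (Nat × Nat)) :
    ∀ {b : List (List Char)}, Shape M N b →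
      getCol (erasePass3A b c info) c = movesCol info (getCol b c) ∧
      (∀ c', c' ≠ c → getCol (erasePass3A b c info) c' = getCol b c') ∧
      Shape M N (erasePass3A b c info) := by
  induction info with
  | nil =>
    intro b hb
    exact ⟨rfl, fun c' _ => rfl, hb⟩
  | cons p rest ih =>
    intro b hb
    have hstep : erasePass3A b c (p :: rest) =
        erasePass3A (set2 (set2 b (p.1 + p.2) c (get2 b p.1 c ' ')) p.1 c ' ') c rest := rfl
    have hsh1 : Shape M N (set2 (set2 b (p.1 + p.2) c (get2 b p.1 c ' ')) p.1 c ' ') :=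
      shape_set2 (shape_set2 hb _ _ _) _ _ _
    obtain ⟨ih1, ih2, ih3⟩ := ih hsh1
    have hcol : getCol (set2 (set2 b (p.1 + p.2) c (get2 b p.1 c ' ')) p.1 c ' ') c =
        (((getCol b c).set (p.1 + p.2) ((getCol b c).getD p.1 ' ')).set p.1 ' ') := by
      rw [getCol_set2_same (shape_set2 hb _ _ _) hc,
        getCol_set2_same hb hc, getD_getCol]
    refine ⟨?_, ?_, by rw [hstep]; exact ih3⟩
    · rw [hstep, ih1, hcol]
      rfl
    · intro c' hne
      rw [hstep, ih2 c' hne, getCol_set2_ne hne, getCol_set2_ne hne]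

theorem erase_spec {M N : Nat} {g : List (List Char)} {v : List (List Bool)}
    (hg : Shape M N g) (hv : Shape M N v) :
    (∀ c, c < N → getCol (eraseA g v M N).1 c = stack (blankCol g v c M)) ∧
    (eraseA g v M N).2 = falseGrid M N ∧
    Shape M N (eraseA g v M N).1 := by
  have key : ∀ (K : Nat), K ≤ N →
      Shape M N ((List.range K).foldl (fun st c =>
        let st1 := erasePass1A st.1 st.2 c M
        (erasePass3A st1.1 c (erasePass2A st1.1 c M), st1.2)) (g, v)).1 ∧
      Shape M N ((List.range K).foldl (fun st c =>
        let st1 := erasePass1A st.1 st.2 c M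
        (erasePass3A st1.1 c (erasePass2A st1.1 c M), st1.2)) (g, v)).2 ∧
      (∀ c, c < K → getCol ((List.range K).foldl (fun st c =>
        let st1 := erasePass1A st.1 st.2 c M
        (erasePass3A st1.1 c (erasePass2A st1.1 c M), st1.2)) (g, v)).1 c =
          stack (blankCol g v c M)) ∧
      (∀ c, K ≤ c → getCol ((List.range K).foldl (fun st c =>
        let st1 := erasePass1A st.1 st.2 c M
        (erasePass3A st1.1 c (erasePass2A st1.1 c M), st1.2)) (g, v)).1 c = getCol g c) ∧
      (∀ r' c', get2 ((List.range K).foldl (fun st c =>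
        let st1 := erasePass1A st.1 st.2 c M
        (erasePass3A st1.1 c (erasePass2A st1.1 c M), st1.2)) (g, v)).2 r' c' false =
          if c' < K then false else get2 v r' c' false) := by
    intro K
    induction K with
    | zero =>
      intro _
      refine ⟨hg, hv, ?_, fun c _ => rfl, ?_⟩
      · intro c hc; omega
      · intro r' c'; simp
    | succ K ih =>
      intro hKN
      obtain ⟨ihg, ihv, iha, ihb, ihc⟩ := ih (by omega)
      rw [List.range_succ, List.foldl_append, List.foldl_cons, List.foldl_nil]
      set E := (List.range K).foldl (fun st c =>
        let st1 := erasePass1A st.1 st.2 c M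
        (erasePass3A st1.1 c (erasePass2A st1.1 c M), st1.2)) (g, v) with hE
      have hKltN : K < N := by omega
      obtain ⟨p1a, p1b, p1c, p1d, p1e⟩ := pass1_spec ihg ihv hKltN
      set st1 := erasePass1A E.1 E.2 K M with hst1
      obtain ⟨p3a, p3b, p3c⟩ := pass3_spec hKltN (erasePass2A st1.1 K M) p1d
      have hlen1 : (getCol st1.1 K).length = M := by
        rw [length_getCol]; exact p1d.1
      have hstackK : getCol (erasePass3A st1.1 K (erasePass2A st1.1 K M)) K =
          stack (getCol st1.1 K) := by
        rw [p3a, pass2_eq, ← hlen1]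
        exact stack_moves (getCol st1.1 K)
      have hblankK : getCol st1.1 K = blankCol g v K M := by
        rw [p1a]
        unfold blankCol
        apply List.map_congr_left
        intro r _
        rw [ihc r K, if_neg (Nat.lt_irrefl K),
          get2_of_getCol_eq (ihb K (le_refl K)) r]
      refine ⟨p3c, p1e, ?_, ?_, ?_⟩
      · intro c hc
        rcases Nat.lt_or_ge c K with hlt | hge
        · rw [p3b c (by omega), p1b c (by omega)]
          exact iha c hlt
        · have : c = K := by omega
          subst this
          rw [hstackK, hblankK]
      · intro c hc
        rw [p3b c (by omega), p1b c (by omega)]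
        exact ihb c (by omega)
      · intro r' c'
        rw [p1c r' c']
        by_cases h1 : c' = K
        · subst h1
          rw [if_pos rfl, if_pos (by omega)]
        · rw [if_neg h1, ihc r' c']
          by_cases h2 : c' < K
          · rw [if_pos h2, if_pos (by omega)]
          · rw [if_neg h2, if_neg (by omega)]
  obtain ⟨k1, k2, k3, k4, k5⟩ := key N (le_refl N)
  have heq : eraseA g v M N = (List.range N).foldl (fun st c =>
      let st1 := erasePass1A st.1 st.2 c M
      (erasePass3A st1.1 c (erasePass2A st1.1 c M), st1.2)) (g, v) := rfl
  refine ⟨by rw [heq]; exact k3, ?_, by rw [heq]; exact k1⟩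
  rw [heq]
  apply eq_falseGrid k2
  intro r c hr hc
  rw [k5 r c, if_pos hc]

-- B's rebuilt column is the stacked blanked column
theorem restack_eq_stack {M N : Nat} {g : List (List Char)} {v : List (List Bool)}
    {s : List (Nat × Nat)} (hInd : Ind v s) {j : Nat} (hj : j < N)
    (hmem : ∀ p : Nat × Nat, p ∈ s ↔ CoveredP g M N p.1 p.2) :
    restackB (colsOf g M N) M N j = stack (blankCol g v j M) := by
  have hval : ∀ i, i < M → get2 (colsOf g M N) j i ' ' = get2 g i j ' ' := by
    intro i hi
    rw [get2_colsOf, if_pos ⟨hi, hj⟩]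
  have hera : ∀ i, erasedB (colsOf g M N) M N j i = get2 v i j false := by
    intro i
    rw [hInd i j]
    by_cases h : CoveredP g M N i j
    · rw [(erasedB_iff i j).mpr h]
      exact (decide_eq_true ((hmem (i, j)).mpr h)).symm
    · have h1 : erasedB (colsOf g M N) M N j i = false := by
        rw [Bool.eq_false_iff]
        intro hh
        exact h ((erasedB_iff i j).mp hh)
      have h2 : ¬ (i, j) ∈ s := fun hh => h ((hmem (i, j)).mp hh)
      rw [h1]
      exact (decide_eq_false h2).symm
  have hkept : keptOf (blankCol g v j M) =
      ((List.range M).filter (fun i =>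
        !(get2 (colsOf g M N) j i ' ' == ' ') && !erasedB (colsOf g M N) M N j i)).map
        (fun i => get2 (colsOf g M N) j i ' ') := by
    unfold keptOf blankCol
    rw [List.filter_map]
    have hfil : List.filter ((fun x => !(x == ' ')) ∘
        (fun r => if get2 v r j false = true then ' ' else get2 g r j ' '))
        (List.range M) = List.filter (fun i =>
        !(get2 (colsOf g M N) j i ' ' == ' ') && !erasedB (colsOf g M N) M N j i)
        (List.range M) := by
      apply List.filter_congr
      intro i hi
      have hiM : i < M := List.mem_range.mp hi
      simp only [Function.comp]
      rw [hval i hiM, hera i]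
      by_cases h : get2 v i j false = true
      · simp [h]
      · have h' : get2 v i j false = false := by simpa using h
        simp [h']
    rw [hfil]
    apply List.map_congr_left
    intro i hi
    obtain ⟨hiR, hp⟩ := List.mem_filter.mp hi
    have hiM : i < M := List.mem_range.mp hiR
    simp only [Bool.and_eq_true, Bool.not_eq_eq_eq_not, Bool.not_true] at hp
    have hv0 : get2 v i j false = false := by rw [← hera i]; exact hp.2
    rw [hval i hiM, hv0]
    simp
  have hlen : (blankCol g v j M).length = M := by
    unfold blankCol; simp
  unfold restackB stack
  rw [← hkept, hlen]

-- the projection of A's round result is B's round step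
theorem colsOf_round {M N : Nat} {g : List (List Char)} {v : List (List Bool)}
    (hg : Shape M N g) (hv : Shape M N v) {s : List (Nat × Nat)} (hInd : Ind v s)
    (hmem : ∀ p : Nat × Nat, p ∈ s ↔ CoveredP g M N p.1 p.2) :
    colsOf (eraseA g v M N).1 M N = stepB (colsOf g M N) M N := by
  obtain ⟨e1, _, e3⟩ := erase_spec hg hv
  unfold stepB
  rw [show colsOf (eraseA g v M N).1 M N = (List.range N).map
    (fun j => (List.range M).map (fun i => get2 (eraseA g v M N).1 i j ' ')) from rfl]
  apply List.map_congr_left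
  intro j hj
  have hjN : j < N := List.mem_range.mp hj
  rw [← getCol_eq_map_range e3 j, e1 j hjN, restack_eq_stack hInd hjN hmem]

-- ===== the loop =====
theorem loop_eq {M N : Nat} (fuel : Nat) :
    ∀ {g : List (List Char)}, Shape M N g → ∀ (ans : Int),
      loopA fuel g (falseGrid M N) M N ans = loopB fuel (colsOf g M N) M N ans := by
  induction fuel with
  | zero => intro g _ ans; rfl
  | succ fuel ih =>
    intro g hg ans
    obtain ⟨sInd, sSh, sAns, sDone, sWin⟩ := scanA_spec hg ans
    have hcnt : cntB (colsOf g M N) M N = (collectS g M N).length := cnt_eq_length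
    show (let s := scanA g (falseGrid M N) M N ans
      if s.2.2 then s.2.1
      else
        let e := eraseA g s.1 M N
        loopA fuel e.1 e.2 M N s.2.1) = _
    show _ = (let cnt := cntB (colsOf g M N) M N
      if cnt = 0 then ans
      else loopB fuel (stepB (colsOf g M N) M N) M N (ans + cnt))
    by_cases hdone : (collectS g M N).isEmpty = true
    · have hlen0 : (collectS g M N).length = 0 :=
        List.isEmpty_iff_length_eq_zero.mp hdone
      simp only [sDone, hdone, if_true, hcnt, hlen0, sAns]
      simp [hlen0]
    · have hlenne : ¬ (collectS g M N).length = 0 := by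
        intro hh
        exact hdone (List.isEmpty_iff_length_eq_zero.mpr hh)
      have hdone' : (scanA g (falseGrid M N) M N ans).2.2 = false := by
        rw [sDone]; simpa using hdone
      simp only [hdone', Bool.false_eq_true, if_false, hcnt, if_neg hlenne]
      obtain ⟨_, eFalse, eShape⟩ := erase_spec hg sSh
      rw [eFalse, ih eShape, colsOf_round hg sSh sInd (fun p => mem_collectS p), sAns]

theorem colsInit_eq (board : List String) (M N : Nat) :
    colsInitB board M N = colsOf (board.map (·.toList)) M N := by
  unfold colsInitB colsOf
  apply List.map_congr_left
  intro j _
  apply List.map_congr_left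
  intro i _
  unfold get2
  have hrow : (board.map (·.toList)).getD i [] = (board.getD i "").toList := by
    rcases Nat.lt_or_ge i board.length with h | h
    · rw [List.getD_eq_getElem _ [] (by simpa using h), List.getD_eq_getElem _ "" h]
      simp
    · rw [List.getD_eq_default _ _ (by simpa using h), List.getD_eq_default _ _ h]
      rfl
  rw [hrow]

-- degenerate dimensions: no 2x2 block fits, both loops stop at once
theorem scanA_degenerate (b : List (List Char)) (v : List (List Bool)) (M N : Nat)
    (ans : Int) (h : M = 0 ∨ N = 0) : scanA b v M N ans = (v, ans, true) := by
  unfold scanA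
  rw [foldl_id]
  intro st i _
  rw [foldl_id]
  intro st' j _
  exact cell_boundary b (by omega) st'

theorem loopA_degenerate (fuel : Nat) (b : List (List Char)) (v : List (List Bool))
    (M N : Nat) (ans : Int) (h : M = 0 ∨ N = 0) : loopA fuel b v M N ans = ans := by
  cases fuel with
  | zero => rfl
  | succ fuel =>
    show (let s := scanA b v M N ans
      if s.2.2 then s.2.1
      else
        let e := eraseA b s.1 M N
        loopA fuel e.1 e.2 M N s.2.1) = ans
    rw [scanA_degenerate b v M N ans h]
    rfl

theorem loopB_stable (fuel : Nat) (cols : List (List Char)) (M N : Nat)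
    (total : Int) (h : cntB cols M N = 0) : loopB (fuel + 1) cols M N total = total := by
  show (let cnt := cntB cols M N
    if cnt = 0 then total
    else loopB fuel (stepB cols M N) M N (total + cnt)) = total
  rw [h]
  rfl

theorem collectS_small (b : List (List Char)) {M N : Nat} (h : M < 2 ∨ N < 2) :
    collectS b M N = [] := by
  rcases h with h | h
  · unfold collectS
    rw [show M - 1 = 0 from by omega]
    rfl
  · unfold collectS
    apply foldl_id
    intro s i _
    rw [show N - 1 = 0 from by omega]
    rfl

-- ===== VERDICT (by name: the statement is the Claim_ definition above) =====
theorem solution_spec : Claim_equal_solution := by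
  intro m n board _hdom hpre
  unfold Spec_solution solution solution_alt
  by_cases hdeg : m.toNat = 0 ∨ n.toNat = 0
  · rw [loopA_degenerate _ _ _ _ _ _ hdeg, if_pos (by omega)]
  · have hm : 0 < m := by
      rcases Int.lt_or_le 0 m with h | h
      · exact h
      · exact absurd (Or.inl (by omega)) hdeg
    have hn : 0 < n := by
      rcases Int.lt_or_le 0 n with h | h
      · exact h
      · exact absurd (Or.inr (by omega)) hdeg
    obtain ⟨hlen, hrows⟩ : (board.length : Int) = m ∧
        ∀ s ∈ board, (s.toList.length : Int) = n := by
      rcases hpre with h | h | h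
      · omega
      · omega
      · exact h
    have hshape : Shape m.toNat n.toNat (board.map (·.toList)) := by
      constructor
      · simp only [List.length_map]; omega
      · intro row hrow
        simp only [List.mem_map] at hrow
        obtain ⟨s, hs, rfl⟩ := hrow
        have := hrows s hs
        omega
    rw [show (List.replicate m.toNat (List.replicate n.toNat false)) =
        falseGrid m.toNat n.toNat from rfl,
      loop_eq (m.toNat * n.toNat + 1) hshape 0]
    by_cases hsm : m < 2 ∨ n < 2
    · rw [if_pos hsm]
      apply loopB_stable
      rw [cnt_eq_length, collectS_small _ (by omega)]
      rfl
    · rw [if_neg hsm, colsInit_eq]
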